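-- pv_equiv track=rewrite | github.com/oxymnds/ctp-langkey | generate_swift_from_json.py | generate_swift_enum
-- ===== SOURCE A (Python) =====
-- def camel_case_conversion(s):
--     """Converts a string to CamelCase."""
--     words = s.split('_')
--     return words[0].lower() + ''.join(word.capitalize() for word in words[1:])
--
-- def generate_swift_enum(keys_structure):
--     """Generate Swift enum code based on the JSON keys structure."""
--     grouped_keys = {}
--     for key in keys_structure:
--         top_level_key = key.split('.')[0]
--         camel_case_key = camel_case_conversion(top_level_key)
--         if camel_case_key not in grouped_keys:
--             grouped_keys[camel_case_key] = []
--         grouped_keys[camel_case_key].append(key)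
--
--     swift_files = {}
--     for camel_case_key, keys in grouped_keys.items():
--         enum_name = camel_case_key.capitalize()
--         swift_code = f"public extension LangKey {{\n    enum {enum_name}: String {{\n"
--         for key in keys:
--             components = key.split('.')
--             if len(components) >= 3:
--                 case_name = camel_case_conversion(f"{components[1]}_{components[2]}")
--             else:
--                 case_name = camel_case_conversion(components[-1])
--             swift_code += f"        case {case_name} = \"{key}\"\n"
--         swift_code += "    }\n}"
--         swift_files[f"LangKey+{enum_name}.swift"] = swift_code
--
--     return swift_files
-- ===== SOURCE B (Python) =====
-- def camel_case_conversion(s):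
--     """Converts a string to CamelCase."""
--     words = s.split('_')
--     return words[0].lower() + ''.join(word.capitalize() for word in words[1:])
--
-- def generate_swift_enum(keys_structure):
--     """Generate Swift enum code based on the JSON keys structure (single grouping pass)."""
--     bodies = {}
--     for key in keys_structure:
--         components = key.split('.')
--         camel_case_key = camel_case_conversion(components[0])
--         if len(components) >= 3:
--             case_name = camel_case_conversion(f"{components[1]}_{components[2]}")
--         else:
--             case_name = camel_case_conversion(components[-1])
--         bodies[camel_case_key] = bodies.get(camel_case_key, '') + f"        case {case_name} = \"{key}\"\n"
--     return {
--         f"LangKey+{ck.capitalize()}.swift":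
--             f"public extension LangKey {{\n    enum {ck.capitalize()}: String {{\n{body}    }}\n}}"
--         for ck, body in bodies.items()
--     }
-- ===== Notes on version B (the rewrite author's own statement) =====
-- stated objective: simpler
-- what changed: B makes a single pass that computes each key's case line immediately and accumulates per-group body strings in one dict, replacing A's two-phase scheme of grouping raw keys and then re-splitting every key in a nested loop; the final files are a dict comprehension.
import Mathlib
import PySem

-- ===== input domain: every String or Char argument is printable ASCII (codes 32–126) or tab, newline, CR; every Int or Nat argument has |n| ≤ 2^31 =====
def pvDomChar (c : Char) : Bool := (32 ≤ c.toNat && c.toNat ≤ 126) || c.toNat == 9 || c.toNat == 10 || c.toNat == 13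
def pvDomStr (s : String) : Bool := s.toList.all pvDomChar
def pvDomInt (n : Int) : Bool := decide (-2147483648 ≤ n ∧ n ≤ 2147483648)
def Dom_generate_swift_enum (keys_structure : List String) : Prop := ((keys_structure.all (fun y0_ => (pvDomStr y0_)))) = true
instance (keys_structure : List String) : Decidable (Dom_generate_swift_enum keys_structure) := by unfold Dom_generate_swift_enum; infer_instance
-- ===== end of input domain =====

-- B replaces A's two-phase scheme (group raw keys by camelCase prefix, then re-split every key
-- in a nested loop) by a single pass that computes each key's case line immediately and
-- accumulates per-group body strings; objective: simpler, same cost.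

-- ===== PORT A =====
-- str.capitalize() on a list of chars (ASCII domain: first char uppercased, rest lowercased)
def pvCapitalizeChars (w : List Char) : String :=
  match w with
  | [] => ""
  | c :: cs => String.mk (PySem.Chars.upperChar c :: PySem.Chars.lower cs)

-- camel_case_conversion (shared helper of A and B): words[0].lower() + ''.join(w.capitalize())
def pvCamelChars (s : List Char) : String :=
  let words := PySem.Chars.splitOn s ['_']
  String.mk (PySem.Chars.lower (words.headD [])) ++
    PySem.Str.join "" ((words.drop 1).map pvCapitalizeChars)

-- camel_case_conversion(key.split('.')[0])
def pvGroupKey (key : String) : String :=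
  pvCamelChars ((PySem.Chars.splitOn key.toList ['.']).headD [])

-- the 'case …' line both Pythons emit for a key (components[1]_[2] when len >= 3, else last)
def pvCaseLine (key : String) : String :=
  let components := PySem.Chars.splitOn key.toList ['.']
  let case_name :=
    if components.length ≥ 3 then
      pvCamelChars (PySem.List.pyGetD components 1 [] ++ '_' :: PySem.List.pyGetD components 2 [])
    else
      pvCamelChars (components.getLastD [])
  "        case " ++ case_name ++ " = \"" ++ key ++ "\"\n"

def generate_swift_enum (keys_structure : List String) : List (String × String) :=
  let grouped : PySem.Dict String (List String) :=
    keys_structure.foldl (fun d key =>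
      let ck := pvGroupKey key
      let d := if d.contains ck then d else d.insert ck []
      d.modify ck [] (fun l => l ++ [key])) PySem.Dict.empty
  let files : PySem.Dict String String :=
    grouped.items.foldl (fun f p =>
      let enum_name := pvCapitalizeChars p.1.toList
      let code := p.2.foldl (fun s key => s ++ pvCaseLine key)
        ("public extension LangKey {\n    enum " ++ enum_name ++ ": String {\n")
      f.insert ("LangKey+" ++ enum_name ++ ".swift") (code ++ "    }\n}")) PySem.Dict.empty
  files.items

-- ===== PORT B =====
def generate_swift_enum_alt (keys_structure : List String) : List (String × String) :=
  let bodies : PySem.Dict String String :=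
    keys_structure.foldl (fun d key =>
      let ck := pvGroupKey key
      d.insert ck (d.getD ck "" ++ pvCaseLine key)) PySem.Dict.empty
  let files : PySem.Dict String String :=
    bodies.items.foldl (fun f p =>
      let enum_name := pvCapitalizeChars p.1.toList
      f.insert ("LangKey+" ++ enum_name ++ ".swift")
        ("public extension LangKey {\n    enum " ++ enum_name ++ ": String {\n" ++
          p.2 ++ "    }\n}")) PySem.Dict.empty
  files.items

-- ===== PRECONDITION & SPEC =====
def Spec_generate_swift_enum (keys_structure : List String) (out : List (String × String)) : Prop := out = generate_swift_enum_alt keys_structure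
instance (keys_structure : List String) (out : List (String × String)) : Decidable (Spec_generate_swift_enum keys_structure out) := by unfold Spec_generate_swift_enum; infer_instance

-- ===== CLAIM (what is proved, stated in full; the proofs are below) =====
def Claim_equal_generate_swift_enum : Prop := ∀ (keys_structure : List String), Dom_generate_swift_enum keys_structure → Spec_generate_swift_enum keys_structure (generate_swift_enum keys_structure)

-- ===== LEMMAS AND PROOFS =====

-- the body string B accumulates for a group whose (A-side) member list is ks
def pvBodyOf : List String → String
  | [] => ""
  | k :: ks => pvCaseLine k ++ pvBodyOf ks

-- value-map relating A's grouping dict to B's body dict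
def pvMapV (d : PySem.Dict String (List String)) : PySem.Dict String String :=
  PySem.Dict.mk (d.items.map (fun p => (p.1, pvBodyOf p.2)))

theorem pvBody_append (l : List String) (k : String) :
    pvBodyOf (l ++ [k]) = pvBodyOf l ++ pvCaseLine k := by
  induction l with
  | nil => simp [pvBodyOf, String.append_empty, String.empty_append]
  | cons x l ih => simp only [List.cons_append, pvBodyOf, ih, String.append_assoc]

theorem pvFoldl_caseLine (ks : List String) (a : String) :
    ks.foldl (fun s k => s ++ pvCaseLine k) a = a ++ pvBodyOf ks := by
  induction ks generalizing a with
  | nil => simp [pvBodyOf, String.append_empty]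
  | cons k ks ih => simp only [List.foldl_cons, ih, pvBodyOf, String.append_assoc]

theorem pvContains_mapV (d : PySem.Dict String (List String)) (k : String) :
    (pvMapV d).contains k = d.contains k := by
  simp [pvMapV, PySem.Dict.contains, List.any_map, Function.comp_def]

theorem pvGetD_mapV (d : PySem.Dict String (List String)) (k : String) :
    (pvMapV d).getD k "" = pvBodyOf (d.getD k []) := by
  simp only [pvMapV, PySem.Dict.getD, PySem.Dict.get?, List.find?_map, Function.comp_def]
  rcases h : d.items.find? (fun p => p.1 == k) with _ | p
  · simp [h, pvBodyOf]
  · simp [h]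

theorem pvMapV_insert (d : PySem.Dict String (List String)) (k : String) (v : List String) :
    pvMapV (d.insert k v) = (pvMapV d).insert k (pvBodyOf v) := by
  simp only [PySem.Dict.insert, pvContains_mapV]
  by_cases h : d.contains k = true
  · simp only [h, if_true, pvMapV, List.map_map]
    congr 1
    apply List.map_congr_left
    intro p _
    by_cases hp : p.1 = k <;> simp [hp]
  · simp [h, pvMapV]

-- A's step (conditional insert of [] followed by append) is a single insert
theorem pvStepA (d : PySem.Dict String (List String)) (ck key : String) :
    (if d.contains ck then d else d.insert ck []).modify ck [] (fun l => l ++ [key])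
      = d.insert ck (d.getD ck [] ++ [key]) := by
  by_cases h : d.contains ck = true
  · simp [h, PySem.Dict.modify]
  · have hc : d.contains ck = false := by simpa using h
    simp only [h, Bool.false_eq_true, if_false, PySem.Dict.modify,
      PySem.Dict.getD_insert_self, PySem.Dict.insert_insert_self,
      PySem.Dict.getD_of_not_contains d [] hc]

-- loop invariant: B's single-pass fold is the value-map of A's grouping fold
theorem pvLoop (ks : List String) (d : PySem.Dict String (List String)) :
    ks.foldl (fun d key =>
        let ck := pvGroupKey key
        d.insert ck (d.getD ck "" ++ pvCaseLine key)) (pvMapV d)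
      = pvMapV (ks.foldl (fun d key =>
        let ck := pvGroupKey key
        let d := if d.contains ck then d else d.insert ck []
        d.modify ck [] (fun l => l ++ [key])) d) := by
  induction ks generalizing d with
  | nil => rfl
  | cons k ks ih =>
      simp only [List.foldl_cons]
      rw [pvStepA d (pvGroupKey k) k]
      have hstep : (pvMapV d).insert (pvGroupKey k) ((pvMapV d).getD (pvGroupKey k) "" ++ pvCaseLine k)
          = pvMapV (d.insert (pvGroupKey k) (d.getD (pvGroupKey k) [] ++ [k])) := by
        rw [pvMapV_insert, pvGetD_mapV, pvBody_append]
      rw [hstep, ih]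

theorem pvEmpty_mapV : pvMapV PySem.Dict.empty = PySem.Dict.empty := rfl

-- ===== VERDICT (by name: the statement is the Claim_ definition above) =====
theorem generate_swift_enum_spec : Claim_equal_generate_swift_enum := by
  intro ks _
  show generate_swift_enum ks = generate_swift_enum_alt ks
  unfold generate_swift_enum generate_swift_enum_alt
  rw [← pvEmpty_mapV, pvLoop]
  dsimp only
  rw [show ∀ g : PySem.Dict String (List String),
        (pvMapV g).items = g.items.map (fun p => (p.1, pvBodyOf p.2)) from fun _ => rfl,
      List.foldl_map]
  refine congrArg PySem.Dict.items ?_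
  apply PySem.List.foldl_congr_mem
  intro acc p _
  dsimp only
  rw [pvFoldl_caseLine, String.append_assoc]
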